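-- pv_equiv track=rewrite | github.com/aerele/essdee_attendance | essdee_attendance/essdee_attendance/doctype/employee_id_card/employee_id_card.py | get_numbers_from_last
-- ===== SOURCE A (Python) =====
-- def get_numbers_from_last(data):
--     length = len(data)
--     index = length
--     for i in range(length-1, -1, -1):
--         try:
--             j = int(data[i])
--             index = i
--         except:
--             break
--     return data[index:]
-- ===== SOURCE B (Python) =====
-- def get_numbers_from_last(data):
--     length = len(data)
--     start = length
--     for i in range(length):
--         try:
--             int(data[i])
--             if start == length:
--                 start = i
--         except:
--             start = length
--     return data[start:]
-- ===== Notes on version B (the rewrite author's own statement) =====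
-- stated objective: alternative
-- what changed: A scans backward from the end with a break; B is a single forward pass that maintains the start index of the current trailing digit run (reset on non-digit), keeping the identical int()/bare-except digit test.
import Mathlib
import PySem

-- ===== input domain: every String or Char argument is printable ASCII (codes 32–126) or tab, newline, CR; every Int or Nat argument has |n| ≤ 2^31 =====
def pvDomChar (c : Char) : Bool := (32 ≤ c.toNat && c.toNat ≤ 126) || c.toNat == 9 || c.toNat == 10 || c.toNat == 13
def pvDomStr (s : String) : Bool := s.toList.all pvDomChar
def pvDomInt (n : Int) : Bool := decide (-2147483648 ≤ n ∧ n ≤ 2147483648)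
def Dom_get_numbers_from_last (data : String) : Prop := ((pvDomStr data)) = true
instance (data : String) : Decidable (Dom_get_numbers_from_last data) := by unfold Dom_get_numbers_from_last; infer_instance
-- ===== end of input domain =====

-- B replaces A's backward scan-with-break by a single forward pass maintaining the start
-- index of the current trailing digit run (objective: alternative decomposition, same cost).

-- the try/except `int(data[i])` test of both Pythons: int() on a one-character string
-- succeeds exactly when PySem.Int.ofStr? returns a value (exact: ofStr? models int())
def pvIsDig (c : Char) : Bool := (PySem.Int.ofStr? (String.ofList [c])).isSome

-- ===== PORT A =====
-- the backward `for i in range(length-1, -1, -1)` with break, as fuel recursion: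
-- fuel n+1 means the loop is at i = n; state `idx` is A's `index`
def pvALoop (cs : List Char) : Nat → Nat → Nat
  | idx, 0 => idx
  | idx, n + 1 => if pvIsDig (cs.getD n ' ') then pvALoop cs n n else idx

def get_numbers_from_last (data : String) : String :=
  let cs := data.toList
  let length := cs.length
  -- data[index:] with 0 ≤ index ≤ length is exactly drop
  String.ofList (cs.drop (pvALoop cs length length))

-- ===== PORT B =====
-- the forward `for i in range(length)` of Source B: i counts up, `start` is Source B's start
def pvBLoop (n : Nat) : List Char → Nat → Nat → Nat
  | [], _, start => start
  | c :: rest, i, start =>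
      pvBLoop n rest (i + 1)
        (if pvIsDig c then (if start = n then i else start) else n)

def get_numbers_from_last_alt (data : String) : String :=
  let cs := data.toList
  let length := cs.length
  String.ofList (cs.drop (pvBLoop length cs 0 length))

-- ===== PRECONDITION & SPEC =====
def Spec_get_numbers_from_last (data : String) (out : String) : Prop := out = get_numbers_from_last_alt data
instance (data : String) (out : String) : Decidable (Spec_get_numbers_from_last data out) := by unfold Spec_get_numbers_from_last; infer_instance

-- ===== CLAIM (what is proved, stated in full; the proofs are below) =====
def Claim_equal_get_numbers_from_last : Prop := ∀ (data : String), Dom_get_numbers_from_last data → Spec_get_numbers_from_last data (get_numbers_from_last data)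

-- ===== LEMMAS AND PROOFS =====

-- length of the trailing digit run of cs
def pvRun (cs : List Char) : Nat := (cs.reverse.takeWhile pvIsDig).length

theorem pvRun_nil : pvRun [] = 0 := rfl

theorem pvRun_le (cs : List Char) : pvRun cs ≤ cs.length := by
  simpa [pvRun] using (List.takeWhile_prefix (l := cs.reverse) (p := pvIsDig)).length_le

theorem pvRun_append (cs : List Char) (c : Char) :
    pvRun (cs ++ [c]) = if pvIsDig c then pvRun cs + 1 else 0 := by
  simp [pvRun, List.takeWhile]
  split <;> simp_all

theorem pvALoop_eq (cs : List Char) :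
    ∀ n, n ≤ cs.length → ∀ idx,
      pvALoop cs idx n = if pvRun (cs.take n) = 0 then idx else n - pvRun (cs.take n) := by
  intro n
  induction n with
  | zero => intro _ idx; simp [pvALoop, pvRun_nil]
  | succ n ih =>
    intro h idx
    have hn : n < cs.length := by omega
    have htake : cs.take (n + 1) = cs.take n ++ [cs.getD n ' '] := by
      rw [List.take_add_one]
      simp [List.getD_eq_getElem?_getD, List.getElem?_eq_getElem hn]
    rw [pvALoop, htake, pvRun_append]
    by_cases hd : pvIsDig (cs.getD n ' ')
    · rw [if_pos hd, if_pos hd]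
      rw [ih (by omega) n]
      have hle := pvRun_le (cs.take n)
      have hlt : (cs.take n).length = n := by simp [List.length_take]; omega
      by_cases hz : pvRun (cs.take n) = 0
      · simp [hz]
      · rw [if_neg hz, if_neg (by omega : ¬ pvRun (cs.take n) + 1 = 0)]
        omega
    · rw [List.getD_eq_getElem?_getD] at hd
      simp [hd]

theorem pvBLoop_eq (cs : List Char) :
    ∀ rest pre : List Char, cs = pre ++ rest →
      pvBLoop cs.length rest pre.length
          (if pvRun pre = 0 then cs.length else pre.length - pvRun pre)
        = cs.length - pvRun cs := by
  intro rest
  induction rest with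
  | nil =>
    intro pre h
    subst h
    simp only [List.append_nil, pvBLoop]
    split <;> omega
  | cons c rest ih =>
    intro pre h
    have hlen : pre.length < cs.length := by subst h; simp
    have hrle := pvRun_le pre
    have h' : cs = (pre ++ [c]) ++ rest := by simp [h]
    have := ih (pre ++ [c]) h'
    rw [pvBLoop]
    have hstate :
        (if pvIsDig c then
            (if (if pvRun pre = 0 then cs.length else pre.length - pvRun pre) = cs.length
              then pre.length
              else (if pvRun pre = 0 then cs.length else pre.length - pvRun pre))
          else cs.length)
        = (if pvRun (pre ++ [c]) = 0 then cs.length else (pre ++ [c]).length - pvRun (pre ++ [c])) := by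
      rw [pvRun_append]
      by_cases hd : pvIsDig c
      · simp only [if_pos hd]
        by_cases hz : pvRun pre = 0
        · simp [hz]
        · have hne : pre.length - pvRun pre ≠ cs.length := by omega
          simp only [if_neg hz, if_neg hne]
          have : pvRun pre + 1 ≠ 0 := by omega
          simp only [if_neg this, List.length_append, List.length_cons, List.length_nil]
          omega
      · simp [hd]
    rw [hstate]
    have hlen' : (pre ++ [c]).length = pre.length + 1 := by simp
    rw [← hlen']
    exact this

theorem pvLoops_agree (cs : List Char) :
    pvALoop cs cs.length cs.length = pvBLoop cs.length cs 0 cs.length := by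
  have hb := pvBLoop_eq cs cs [] (by simp)
  norm_num [pvRun_nil] at hb
  rw [hb, pvALoop_eq cs cs.length le_rfl, List.take_length]
  have := pvRun_le cs
  split <;> omega

-- ===== VERDICT (by name: the statement is the Claim_ definition above) =====
theorem get_numbers_from_last_spec : Claim_equal_get_numbers_from_last := by
  intro data _
  unfold Spec_get_numbers_from_last get_numbers_from_last get_numbers_from_last_alt
  simp only [pvLoops_agree]
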